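-- pv_equiv track=rewrite | github.com/ToloCops/Algo2 | Greedy/dumpster.py | place_dumpsters
-- ===== SOURCE A (Python) =====
-- def place_dumpsters(L: list[int], k: int) -> list[int]:
--     """
--     Places dumpsters along a street based on the given list of house positions and the maximum distance between dumpsters.
--
--     Args:
--         L (list[int]): A list of house positions along the street.
--         k (int): The maximum distance between dumpsters.
--
--     Returns:
--         list[int]: A list of dumpster positions.
--
--     """
--     dumpsters = []
--     street = L[-1]
--     house = L[0]
--     for i in range(k+1):
--         if i == k or house + i == street:
--             dumpsters.append(house+i)
--             break
--
--     for house in L: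
--         if house == L[0]: continue
--         dump = dumpsters[-1]
--         if house - dump > k:
--             for i in range(k+1):
--                 if i == k or house + i == street:
--                     dumpsters.append(house+i)
--                     break
--     return dumpsters
-- ===== SOURCE B (Python) =====
-- def place_dumpsters(L: list[int], k: int) -> list[int]:
--     street = L[-1]
--
--     def cover(h):
--         c = h + k
--         return street if h <= street <= c else c
--
--     res = [cover(L[0])]
--     for h in L[1:]:
--         if h - res[-1] > k:
--             res.append(cover(h))
--     return res
-- ===== Notes on version B (the rewrite author's own statement) =====
-- stated objective: faster
-- what changed: Replaces A's O(k) inner scan over range(k+1) per placed dumpster by a closed-form cover position (street if house<=street<=house+k else house+k), and A's duplicate-of-first-house skip by a single pass over L[1:], giving one linear pass.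
-- outside the precondition, e.g. on place_dumpsters([5], -1): A returns [], B returns [4]
import Mathlib
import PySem

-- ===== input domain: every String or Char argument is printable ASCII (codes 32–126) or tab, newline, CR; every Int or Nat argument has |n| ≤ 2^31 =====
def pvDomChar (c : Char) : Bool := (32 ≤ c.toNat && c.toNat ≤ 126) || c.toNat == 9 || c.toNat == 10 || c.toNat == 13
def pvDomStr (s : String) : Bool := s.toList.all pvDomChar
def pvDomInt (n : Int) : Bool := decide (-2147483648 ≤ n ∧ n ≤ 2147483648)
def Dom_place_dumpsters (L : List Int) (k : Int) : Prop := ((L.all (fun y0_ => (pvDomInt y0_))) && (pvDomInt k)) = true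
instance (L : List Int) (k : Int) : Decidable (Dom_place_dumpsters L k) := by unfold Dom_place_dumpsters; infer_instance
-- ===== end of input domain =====

-- B replaces A's O(k) inner scan per dumpster by a closed-form cover position and a single
-- pass over the tail, for an asymptotic speed-up (O(n·k) → O(n)).

-- ===== PORT A =====
-- A's inner loop 'for i in range(k+1): if i == k or house+i == street: append(house+i); break',
-- transcribed as the counting loop it is (i runs from its argument up to k, early exit on the break)
def pvFirstCover (house street k i : Int) : Option Int :=
  if _h : i < k + 1 then
    if i = k ∨ house + i = street then some (house + i)
    else pvFirstCover house street k (i + 1)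
  else none
termination_by (k + 1 - i).toNat
decreasing_by omega

def place_dumpsters (L : List Int) (k : Int) : List Int :=
  match L with
  | [] => []  -- L[-1] raises IndexError; excluded by Pre_
  | h0 :: rest =>
    let street := (h0 :: rest).getLastD 0
    let dumpsters :=
      match pvFirstCover h0 street k 0 with
      | some v => [v]
      | none => []
    (h0 :: rest).foldl (fun acc house =>
      if house = h0 then acc
      else
        match acc.getLast? with
        | none => acc  -- dumpsters[-1] raises IndexError; excluded by Pre_
        | some dump =>
          if house - dump > k then
            match pvFirstCover house street k 0 with
            | some v => acc ++ [v]
            | none => acc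
          else acc) dumpsters

-- ===== PORT B =====
def pvCover (street k h : Int) : Int :=
  if h ≤ street ∧ street ≤ h + k then street else h + k

def place_dumpsters_alt (L : List Int) (k : Int) : List Int :=
  match L with
  | [] => []  -- L[-1] raises IndexError; excluded by Pre_
  | h0 :: rest =>
    let street := (h0 :: rest).getLastD 0
    rest.foldl (fun acc h =>
      if h - acc.getLastD 0 > k then acc ++ [pvCover street k h] else acc)
      [pvCover street k h0]

-- ===== PRECONDITION & SPEC =====
-- Pre_ excludes empty L (A raises IndexError) and k < 0 (A raises IndexError on dumpsters[-1]
-- whenever some element differs from L[0]; on the degenerate all-equal lists it returns an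
-- accidental empty list — a negative maximum distance is outside the function's natural domain).
def Pre_place_dumpsters (L : List Int) (k : Int) : Prop := L ≠ [] ∧ 0 ≤ k
instance (L : List Int) (k : Int) : Decidable (Pre_place_dumpsters L k) := by unfold Pre_place_dumpsters; infer_instance

def pvWitness_place_dumpsters : List Int × Int := ([1, 3, 7, 10], 4)

def Spec_place_dumpsters (L : List Int) (k : Int) (out : List Int) : Prop := out = place_dumpsters_alt L k
instance (L : List Int) (k : Int) (out : List Int) : Decidable (Spec_place_dumpsters L k out) := by unfold Spec_place_dumpsters; infer_instance

-- ===== CLAIM (what is proved, stated in full; the proofs are below) =====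
def Claim_equal_place_dumpsters : Prop := ∀ (L : List Int) (k : Int), Dom_place_dumpsters L k → Pre_place_dumpsters L k → Spec_place_dumpsters L k (place_dumpsters L k)

-- ===== LEMMAS AND PROOFS =====

-- A's inner scan from i = a up to k computes the closed-form cover position.
lemma pvFirstCover_pyRange (h st k : Int) :
    ∀ (a : Int), 0 ≤ a → a ≤ k →
    pvFirstCover h st k a =
      some (if a ≤ st - h ∧ st - h ≤ k then st else h + k) := by
  intro a ha hak
  generalize hfuel : (k - a).toNat = n
  induction n generalizing a with
  | zero =>
    have hak' : a = k := by omega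
    subst hak'
    rw [pvFirstCover, dif_pos (by omega), if_pos (Or.inl rfl)]
    by_cases hc : a ≤ st - h ∧ st - h ≤ a
    · rw [if_pos hc]; simp only [Option.some.injEq]; omega
    · rw [if_neg hc]
  | succ n ih =>
    have hlt : a < k := by omega
    rw [pvFirstCover, dif_pos (by omega)]
    by_cases hhit : h + a = st
    · rw [if_pos (Or.inr hhit), if_pos ⟨by omega, by omega⟩]
      simp only [Option.some.injEq]; omega
    · rw [if_neg (by omega), ih (a + 1) (by omega) (by omega) (by omega)]
      by_cases hc : a + 1 ≤ st - h ∧ st - h ≤ k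
      · rw [if_pos hc, if_pos ⟨by omega, hc.2⟩]
      · rw [if_neg hc, if_neg (by omega)]

lemma pvFirstCover_eq_cover (h st k : Int) (hk : 0 ≤ k) :
    pvFirstCover h st k 0 = some (pvCover st k h) := by
  rw [pvFirstCover_pyRange h st k 0 le_rfl hk]
  unfold pvCover
  exact congrArg some (if_congr (by omega) rfl rfl)

lemma pvCover_ge (st k h : Int) (hk : 0 ≤ k) : h ≤ pvCover st k h := by
  unfold pvCover; split_ifs with hc
  · exact hc.1
  · omega

-- The folds agree: the step functions differ only on houses equal to L[0],
-- where both leave the accumulator unchanged (the last dumpster is already ≥ L[0]).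
-- stated for the step function after pvFirstCover is rewritten to pvCover
lemma fold_eq (street k h0 : Int) (hk : 0 ≤ k) :
    ∀ (rest acc : List Int) (w : Int), acc.getLast? = some w → h0 ≤ w →
    List.foldl (fun acc house =>
      if house = h0 then acc
      else
        match acc.getLast? with
        | none => acc
        | some dump =>
          if house - dump > k then acc ++ [pvCover street k house] else acc) acc rest =
    List.foldl (fun acc h =>
      if h - acc.getLastD 0 > k then acc ++ [pvCover street k h] else acc) acc rest := by
  intro rest
  induction rest with
  | nil => intro acc w hw hge; rfl
  | cons h t ih =>
    intro acc w hw hge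
    have hlastD : acc.getLastD 0 = w := by
      rw [List.getLastD_eq_getLast?, hw]; rfl
    simp only [List.foldl_cons, hw, hlastD]
    by_cases heq : h = h0
    · subst heq
      rw [if_pos rfl, if_neg (by omega)]
      exact ih acc w hw hge
    · rw [if_neg heq]
      by_cases hfar : h - w > k
      · rw [if_pos hfar]
        exact ih (acc ++ [pvCover street k h]) (pvCover street k h)
          (by rw [List.getLast?_concat])
          (le_trans (by omega) (pvCover_ge street k h hk))
      · rw [if_neg hfar]
        exact ih acc w hw hge

-- ===== VERDICT (by name: the statement is the Claim_ definition above) =====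
theorem place_dumpsters_spec : Claim_equal_place_dumpsters := by
  intro L k _hdom hpre
  obtain ⟨hne, hk⟩ := hpre
  unfold Spec_place_dumpsters
  match L with
  | [] => exact absurd rfl hne
  | h0 :: rest =>
    unfold place_dumpsters place_dumpsters_alt
    simp only [pvFirstCover_eq_cover _ _ k hk, List.foldl_cons, if_true]
    exact fold_eq ((h0 :: rest).getLastD 0) k h0 hk rest
      [pvCover ((h0 :: rest).getLastD 0) k h0] (pvCover ((h0 :: rest).getLastD 0) k h0) rfl
      (pvCover_ge _ k h0 hk)
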